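-- pv_equiv track=rewrite | github.com/hucebot/Parametric-Task_MAP-Elites | Archive/base_talos_01.py | get_all_R_Leg_conditions
-- ===== SOURCE A (Python) =====
-- from copy import copy, deepcopy
--
-- def get_all_R_Leg_conditions(n=7):
--     Conditions = [(True, [])]
--     old_Conditions = []
--     for i in range(1, n):
--         old_Conditions = deepcopy(Conditions)
--         Conditions = []
--         for (b, condition) in old_Conditions:
--             if b:
--                 c0, c1, c2, c3 = copy(condition), copy(condition), copy(condition), copy(condition)
--                 c1.append(f"Passive_R_Leg_{i}")
--                 c2.append(f"Locked_R_Leg_{i}")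
--                 c3.append(f"Cut_R_Leg_{i}")
--                 Conditions.append((True,c1))
--                 Conditions.append((True,c2))
--                 Conditions.append((False,c3))
--                 Conditions.append((True,c0))
--             else:
--                 Conditions.append((False,copy(condition)))
--     return [c for (_,c) in Conditions if len(c)>0]
-- ===== SOURCE B (Python) =====
-- def get_all_R_Leg_conditions(n=7):
--     # Build, from the last joint backwards, the list of condition "suffixes"
--     # reachable from an active state at joint i; DFS/BFS leaf order is preserved.
--     suffixes = [[]]
--     for i in reversed(range(1, n)):
--         suffixes = ([[f"Passive_R_Leg_{i}"] + s for s in suffixes]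
--                     + [[f"Locked_R_Leg_{i}"] + s for s in suffixes]
--                     + [[f"Cut_R_Leg_{i}"]]
--                     + suffixes)
--     return [s for s in suffixes if s]
-- ===== Notes on version B (the rewrite author's own statement) =====
-- stated objective: faster
-- what changed: Replaced the forward level-by-level BFS over (flag, condition) pairs with per-round deepcopy by a backward iterative suffix construction that builds the final condition lists directly (no flags, no deepcopy), preserving the leaf order.
import Mathlib
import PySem

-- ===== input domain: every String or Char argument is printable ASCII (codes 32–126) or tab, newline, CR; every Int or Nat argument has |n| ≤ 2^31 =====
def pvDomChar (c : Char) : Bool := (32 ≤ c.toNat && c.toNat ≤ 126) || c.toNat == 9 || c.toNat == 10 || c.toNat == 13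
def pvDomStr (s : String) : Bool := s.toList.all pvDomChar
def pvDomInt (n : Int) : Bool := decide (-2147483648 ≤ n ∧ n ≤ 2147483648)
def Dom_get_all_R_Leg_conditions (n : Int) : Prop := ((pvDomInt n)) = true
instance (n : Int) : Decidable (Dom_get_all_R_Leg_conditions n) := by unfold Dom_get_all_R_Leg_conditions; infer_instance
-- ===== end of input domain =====

-- B replaces A's forward BFS over (flag, condition) pairs (with per-level deepcopy) by a
-- backward iterative suffix construction without flags or deepcopy; same values, same order.

-- ===== PORT A =====
-- inner loop: for (b, condition) in old_Conditions: append expansions to Conditions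
def pvAInner (i : Int) : List (Bool × List String) → List (Bool × List String)
  | [] => []
  | (b, c) :: rest =>
    (if b then
      [(true, c ++ ["Passive_R_Leg_" ++ PySem.Int.toStr i]),
       (true, c ++ ["Locked_R_Leg_" ++ PySem.Int.toStr i]),
       (false, c ++ ["Cut_R_Leg_" ++ PySem.Int.toStr i]),
       (true, c)]
    else [(b, c)]) ++ pvAInner i rest

def get_all_R_Leg_conditions (n : Int) : List (List String) :=
  let conds := (PySem.List.pyRange 1 n 1).foldl (fun acc i => pvAInner i acc) [(true, [])]
  conds.filterMap (fun p => if p.2.length > 0 then some p.2 else none)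

-- ===== PORT B =====
-- one round of the backward loop body
def pvBStep (i : Int) (suf : List (List String)) : List (List String) :=
  suf.map (fun s => ("Passive_R_Leg_" ++ PySem.Int.toStr i) :: s) ++
  suf.map (fun s => ("Locked_R_Leg_" ++ PySem.Int.toStr i) :: s) ++
  [[("Cut_R_Leg_" ++ PySem.Int.toStr i)]] ++ suf

def get_all_R_Leg_conditions_alt (n : Int) : List (List String) :=
  ((PySem.List.pyRange 1 n 1).reverse.foldl (fun suf i => pvBStep i suf) [[]]).filter
    (fun s => !s.isEmpty)

-- ===== PRECONDITION & SPEC =====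
def Spec_get_all_R_Leg_conditions (n : Int) (out : List (List String)) : Prop := out = get_all_R_Leg_conditions_alt n
instance (n : Int) (out : List (List String)) : Decidable (Spec_get_all_R_Leg_conditions n out) := by unfold Spec_get_all_R_Leg_conditions; infer_instance

-- ===== CLAIM (what is proved, stated in full; the proofs are below) =====
def Claim_equal_get_all_R_Leg_conditions : Prop := ∀ (n : Int), Dom_get_all_R_Leg_conditions n → Spec_get_all_R_Leg_conditions n (get_all_R_Leg_conditions n)

-- ===== LEMMAS AND PROOFS =====

-- proof-side bridge: the DFS over the joint tree, emitting finished nonempty conditions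
def pvBRec (n : Int) (i : Int) (active : Bool) (cond : List String) : List (List String) :=
  if n ≤ i then (if cond.length > 0 then [cond] else [])
  else if active then
    pvBRec n (i + 1) true (cond ++ ["Passive_R_Leg_" ++ PySem.Int.toStr i]) ++
    pvBRec n (i + 1) true (cond ++ ["Locked_R_Leg_" ++ PySem.Int.toStr i]) ++
    pvBRec n (i + 1) false (cond ++ ["Cut_R_Leg_" ++ PySem.Int.toStr i]) ++
    pvBRec n (i + 1) true cond
  else
    pvBRec n (i + 1) active cond
termination_by (n - i).toNat
decreasing_by all_goals omega

-- proof-side: the suffix lists producible from an active state at joint i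
def pvSuf (n : Int) (i : Int) : List (List String) :=
  if n ≤ i then [[]]
  else
    (pvSuf n (i + 1)).map (fun s => ("Passive_R_Leg_" ++ PySem.Int.toStr i) :: s) ++
    (pvSuf n (i + 1)).map (fun s => ("Locked_R_Leg_" ++ PySem.Int.toStr i) :: s) ++
    [[("Cut_R_Leg_" ++ PySem.Int.toStr i)]] ++ pvSuf n (i + 1)
termination_by (n - i).toNat
decreasing_by all_goals omega

-- one BFS expansion step, then DFS from i+1, is DFS from i (i < n)
theorem pvBRec_step (n i : Int) (h : i < n) (L : List (Bool × List String)) :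
    (pvAInner i L).flatMap (fun p => pvBRec n (i + 1) p.1 p.2)
      = L.flatMap (fun p => pvBRec n i p.1 p.2) := by
  induction L with
  | nil => simp [pvAInner]
  | cons hd tl ih =>
    obtain ⟨b, c⟩ := hd
    rw [pvAInner, List.flatMap_append, ih, List.flatMap_cons, pvBRec,
      if_neg (not_le.mpr h)]
    cases b <;> simp [List.flatMap_cons, List.append_assoc]

-- filterMap of the nonempty conditions equals the DFS leaf lists at i ≥ n
theorem pvFilter_eq_flatMap (n i : Int) (h : n ≤ i) (L : List (Bool × List String)) :
    L.filterMap (fun p => if p.2.length > 0 then some p.2 else none)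
      = L.flatMap (fun p => pvBRec n i p.1 p.2) := by
  induction L with
  | nil => simp
  | cons hd tl ih =>
    rw [List.filterMap_cons, List.flatMap_cons, ← ih, pvBRec, if_pos h]
    by_cases hc : hd.2.length > 0 <;> simp [hc]

-- A-side invariant: BFS over the remaining range, then filtering, equals flatMap of DFS
theorem pvMain (n : Int) : ∀ (i : Int) (L : List (Bool × List String)),
    ((PySem.List.pyRange i n 1).foldl (fun acc j => pvAInner j acc) L).filterMap
        (fun p => if p.2.length > 0 then some p.2 else none)
      = L.flatMap (fun p => pvBRec n i p.1 p.2) := by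
  intro i
  induction hfu : (n - i).toNat generalizing i with
  | zero =>
    intro L
    have h : n ≤ i := by omega
    rw [PySem.List.pyRange_one, hfu]
    simpa using pvFilter_eq_flatMap n i h L
  | succ k ih =>
    intro L
    have h : i < n := by omega
    rw [PySem.List.pyRange_one_cons h, List.foldl_cons]
    rw [ih (i + 1) (by omega), pvBRec_step n i h]

-- an inactive state just carries its condition to the end
theorem pvBRec_false (n : Int) : ∀ (i : Int) (c : List String),
    pvBRec n i false c = if c.length > 0 then [c] else [] := by
  intro i
  induction hfu : (n - i).toNat generalizing i with
  | zero => intro c; rw [pvBRec, if_pos (by omega)]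
  | succ k ih =>
    intro c
    rw [pvBRec, if_neg (by omega)]
    exact ih (i + 1) (by omega) c

-- DFS from an active state = prefix c glued onto every suffix, keeping nonempty results
theorem pvBRec_true (n : Int) : ∀ (i : Int) (c : List String),
    pvBRec n i true c = ((pvSuf n i).map (fun s => c ++ s)).filter (fun s => 0 < s.length) := by
  intro i
  induction hfu : (n - i).toNat generalizing i with
  | zero =>
    intro c
    have h : n ≤ i := by omega
    rw [pvBRec, if_pos h, pvSuf, if_pos h]
    by_cases hc : c.length > 0 <;> simp [hc, List.filter]
  | succ k ih =>
    intro c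
    have h : ¬ n ≤ i := by omega
    rw [pvBRec, if_neg h, pvSuf, if_neg h]
    rw [ih (i + 1) (by omega), ih (i + 1) (by omega), ih (i + 1) (by omega),
      pvBRec_false]
    simp only [List.map_append, List.filter_append, List.map_map, List.map_cons,
      List.map_nil, List.filter_cons]
    simp [Function.comp_def, List.append_assoc]

-- B-side invariant: folding the backward loop body over the remaining range builds pvSuf
theorem pvBFold (n : Int) : ∀ (i : Int),
    (PySem.List.pyRange i n 1).foldr (fun j suf => pvBStep j suf) [[]] = pvSuf n i := by
  intro i
  induction hfu : (n - i).toNat generalizing i with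
  | zero =>
    have h : n ≤ i := by omega
    rw [PySem.List.pyRange_one, hfu, pvSuf, if_pos h]
    simp
  | succ k ih =>
    have h : i < n := by omega
    rw [PySem.List.pyRange_one_cons h, List.foldr_cons, ih (i + 1) (by omega)]
    conv_rhs => rw [pvSuf]
    rw [if_neg (not_le.mpr h)]
    rfl

-- ===== VERDICT (by name: the statement is the Claim_ definition above) =====
theorem get_all_R_Leg_conditions_spec : Claim_equal_get_all_R_Leg_conditions := by
  intro n _
  unfold Spec_get_all_R_Leg_conditions get_all_R_Leg_conditions get_all_R_Leg_conditions_alt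
  rw [List.foldl_reverse]
  have hb : (PySem.List.pyRange 1 n 1).foldr (fun x y => pvBStep x y) [[]] = pvSuf n 1 :=
    pvBFold n 1
  rw [hb, pvMain n 1 [(true, [])]]
  simp only [List.flatMap_cons, List.flatMap_nil, List.append_nil]
  rw [pvBRec_true n 1 []]
  simp only [List.nil_append, List.map_id']
  exact List.filter_congr (by intro s _; cases s <;> simp)
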